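-- pv_equiv track=rewrite | github.com/zym20000325/Lead | cleanPipeline_method2.py | create_conversations
-- ===== SOURCE A (Python) =====
-- def create_conversations(sentence_list, name1, name2):
--
--     conversations = []
--     current_conversation = {}
--     name1_said = None
--     name2_said = None
--
--     for name, sentence in sentence_list:
--         if name == name1 and name1_said is None and name2_said is None:
--             name1_said = sentence
--         elif name == name2 and name2_said is None and name1_said is not None:
--             name2_said = sentence
--
--         if name1_said is not None and name2_said is not None:
--             current_conversation[name1] = name1_said
--             current_conversation[name2] = name2_said
--             conversations.append(current_conversation)
--             current_conversation = {}
--             name1_said = None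
--             name2_said = None
--
--     return conversations
-- ===== SOURCE B (Python) =====
-- def create_conversations(sentence_list, name1, name2):
--     idx1 = [(i, s) for i, (n, s) in enumerate(sentence_list) if n == name1]
--     idx2 = [(i, s) for i, (n, s) in enumerate(sentence_list) if n == name2]
--     conversations = []
--     i = 0
--     j = 0
--     while i < len(idx1):
--         a, sa = idx1[i]
--         while j < len(idx2) and idx2[j][0] <= a:
--             j += 1
--         if j == len(idx2):
--             break
--         b, sb = idx2[j]
--         j += 1
--         conversations.append({name1: sa, name2: sb})
--         while i < len(idx1) and idx1[i][0] <= b: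
--             i += 1
--     return conversations
-- ===== Notes on version B (the rewrite author's own statement) =====
-- stated objective: alternative
-- what changed: A's single-pass four-variable state machine is replaced by gather-then-merge: first collect the (index, sentence) occurrences of each speaker, then pair them with two pointers (take a name1 occurrence, advance to the first name2 occurrence strictly after it, emit, skip name1 occurrences up to it).
import Mathlib
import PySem

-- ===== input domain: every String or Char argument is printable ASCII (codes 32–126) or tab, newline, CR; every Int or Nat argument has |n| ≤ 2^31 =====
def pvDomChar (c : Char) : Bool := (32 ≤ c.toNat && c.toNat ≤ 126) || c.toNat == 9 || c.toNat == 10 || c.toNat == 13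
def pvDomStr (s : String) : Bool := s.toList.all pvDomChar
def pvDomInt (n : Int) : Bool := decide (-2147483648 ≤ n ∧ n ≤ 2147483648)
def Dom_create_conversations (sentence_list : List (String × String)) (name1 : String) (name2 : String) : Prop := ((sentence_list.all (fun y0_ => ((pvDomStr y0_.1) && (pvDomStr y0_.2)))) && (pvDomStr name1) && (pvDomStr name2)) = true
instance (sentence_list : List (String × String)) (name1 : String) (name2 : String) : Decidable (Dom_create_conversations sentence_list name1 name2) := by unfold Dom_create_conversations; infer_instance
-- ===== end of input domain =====

-- B replaces A's one-pass state machine by a gather-then-merge pass: it collects the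
-- (index, sentence) occurrences of each speaker and pairs them with two pointers (alternative decomposition, same cost).

-- ===== PORT A =====
-- one loop iteration of A: state = (conversations, current_conversation, name1_said, name2_said)
def pvStepA (name1 name2 : String)
    (st : List (PySem.Dict String String) × PySem.Dict String String × Option String × Option String)
    (ns : String × String) :
    List (PySem.Dict String String) × PySem.Dict String String × Option String × Option String :=
  let conversations := st.1
  let cur := st.2.1
  let o1 := st.2.2.1
  let o2 := st.2.2.2
  let p :=
    if ns.1 == name1 && o1.isNone && o2.isNone then (some ns.2, o2)
    else if ns.1 == name2 && o2.isNone && o1.isSome then (o1, some ns.2)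
    else (o1, o2)
  match p.1, p.2 with
  | some s1, some s2 =>
      (conversations ++ [(cur.insert name1 s1).insert name2 s2], PySem.Dict.empty, none, none)
  | o1', o2' => (conversations, cur, o1', o2')

def create_conversations (sentence_list : List (String × String)) (name1 : String) (name2 : String) : List (List (String × String)) :=
  ((sentence_list.foldl (pvStepA name1 name2) ([], PySem.Dict.empty, none, none)).1).map (·.items)

-- ===== PORT B =====
-- the two-pointer merge of B's while loop: l1 = remaining name1 occurrences (head = current a),
-- l2 = remaining name2 occurrences; the inner while loops are the dropWhile calls
def pvMerge (name1 name2 : String) :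
    List (Int × String) → List (Int × String) → List (List (String × String))
  | [], _ => []
  | (a, sa) :: r1, l2 =>
    match l2.dropWhile (fun p => decide (p.1 ≤ a)) with
    | [] => []
    | (b, sb) :: r2 =>
        ((PySem.Dict.empty.insert name1 sa).insert name2 sb).items ::
          pvMerge name1 name2 (r1.dropWhile (fun p => decide (p.1 ≤ b))) r2
  termination_by l1 _ => l1.length
  decreasing_by
    have := List.length_dropWhile_le (fun p => decide (p.1 ≤ b)) r1
    simp only [List.length_cons]
    omega

def create_conversations_alt (sentence_list : List (String × String)) (name1 : String) (name2 : String) : List (List (String × String)) :=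
  let idx1 := ((PySem.List.enumerate sentence_list 0).filter (fun p => p.2.1 == name1)).map (fun p => (p.1, p.2.2))
  let idx2 := ((PySem.List.enumerate sentence_list 0).filter (fun p => p.2.1 == name2)).map (fun p => (p.1, p.2.2))
  pvMerge name1 name2 idx1 idx2

-- ===== PRECONDITION & SPEC =====
def Spec_create_conversations (sentence_list : List (String × String)) (name1 : String) (name2 : String) (out : List (List (String × String))) : Prop := out = create_conversations_alt sentence_list name1 name2
instance (sentence_list : List (String × String)) (name1 : String) (name2 : String) (out : List (List (String × String))) : Decidable (Spec_create_conversations sentence_list name1 name2 out) := by unfold Spec_create_conversations; infer_instance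

-- ===== CLAIM (what is proved, stated in full; the proofs are below) =====
def Claim_equal_create_conversations : Prop := ∀ (sentence_list : List (String × String)) (name1 : String) (name2 : String), Dom_create_conversations sentence_list name1 name2 → Spec_create_conversations sentence_list name1 name2 (create_conversations sentence_list name1 name2)

-- ===== LEMMAS AND PROOFS =====

-- reference state machine: seek the first name1 utterance, then the next name2 utterance after it
mutual
def pvSeek1 (n1 n2 : String) : List (String × String) → List (PySem.Dict String String)
  | [] => []
  | (n, s) :: r => if n == n1 then pvSeek2 n1 n2 s r else pvSeek1 n1 n2 r
def pvSeek2 (n1 n2 : String) (sa : String) : List (String × String) → List (PySem.Dict String String)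
  | [] => []
  | (n, s) :: r =>
      if n == n2 then (PySem.Dict.empty.insert n1 sa).insert n2 s :: pvSeek1 n1 n2 r
      else pvSeek2 n1 n2 sa r
end

-- the filtered (index, sentence) list starting at index k
def pvF (nm : String) (k : Int) (l : List (String × String)) : List (Int × String) :=
  ((PySem.List.enumerate l k).filter (fun p => p.2.1 == nm)).map (fun p => (p.1, p.2.2))

theorem pvF_nil (nm : String) (k : Int) : pvF nm k [] = [] := by
  simp [pvF, PySem.List.enumerate_nil]

theorem pvF_cons (nm : String) (k : Int) (n s : String) (r : List (String × String)) :
    pvF nm k ((n, s) :: r) = if n == nm then (k, s) :: pvF nm (k + 1) r else pvF nm (k + 1) r := by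
  simp only [pvF, PySem.List.enumerate_cons, List.filter_cons]
  by_cases h : n == nm <;> simp [h]

theorem pvF_lb (nm : String) (k : Int) (l : List (String × String)) :
    ∀ p ∈ pvF nm k l, k ≤ p.1 := by
  induction l generalizing k with
  | nil => simp [pvF_nil]
  | cons x r ih =>
    obtain ⟨n, s⟩ := x
    intro p hp
    rw [pvF_cons] at hp
    split at hp
    · rcases List.mem_cons.1 hp with h | h
      · subst h; simp
      · have := ih (k + 1) p h; omega
    · have := ih (k + 1) p hp; omega

theorem pvDrop_all {b : Int} (t : List (Int × String)) (ht : ∀ p ∈ t, p.1 ≤ b)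
    (l2 : List (Int × String)) :
    (t ++ l2).dropWhile (fun p => decide (p.1 ≤ b)) = l2.dropWhile (fun p => decide (p.1 ≤ b)) := by
  induction t with
  | nil => simp
  | cons x t ih =>
    have hx : x.1 ≤ b := ht x (by simp)
    simp only [List.cons_append, List.dropWhile_cons, decide_eq_true_eq, if_pos hx]
    exact ih (fun p hp => ht p (by simp [hp]))

theorem pvDrop_none {b : Int} (l : List (Int × String)) (hl : ∀ p ∈ l, b < p.1) :
    l.dropWhile (fun p => decide (p.1 ≤ b)) = l := by
  cases l with
  | nil => rfl
  | cons x r =>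
    have := hl x (by simp)
    simp only [List.dropWhile_cons, decide_eq_true_eq]
    rw [if_neg (by omega)]

theorem pvMerge_nil (n1 n2 : String) (l2 : List (Int × String)) :
    pvMerge n1 n2 [] l2 = [] := by
  rw [pvMerge]

theorem pvMerge_cons_none (n1 n2 : String) (a : Int) (sa : String)
    (r1 l2 : List (Int × String))
    (h : l2.dropWhile (fun p => decide (p.1 ≤ a)) = []) :
    pvMerge n1 n2 ((a, sa) :: r1) l2 = [] := by
  rw [pvMerge, h]

theorem pvMerge_cons_emit (n1 n2 : String) (a b : Int) (sa sb : String)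
    (r1 l2 r2 : List (Int × String))
    (h : l2.dropWhile (fun p => decide (p.1 ≤ a)) = (b, sb) :: r2) :
    pvMerge n1 n2 ((a, sa) :: r1) l2 =
      ((PySem.Dict.empty.insert n1 sa).insert n2 sb).items ::
        pvMerge n1 n2 (r1.dropWhile (fun p => decide (p.1 ≤ b))) r2 := by
  rw [pvMerge, h]

-- combined two-pointer invariant: pvMerge over the filtered lists computes the reference machine
theorem pvKey (n1 n2 : String) (l : List (String × String)) :
    (∀ (k : Int) (t2 : List (Int × String)), (∀ p ∈ t2, p.1 < k) →
       pvMerge n1 n2 (pvF n1 k l) (t2 ++ pvF n2 k l) = (pvSeek1 n1 n2 l).map (·.items))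
    ∧ (∀ (k a : Int) (sa : String) (t1 t2 : List (Int × String)),
         a < k → (∀ p ∈ t1, p.1 < k) → (∀ p ∈ t2, p.1 ≤ a) →
       pvMerge n1 n2 ((a, sa) :: (t1 ++ pvF n1 k l)) (t2 ++ pvF n2 k l)
         = (pvSeek2 n1 n2 sa l).map (·.items)) := by
  induction l with
  | nil =>
    refine ⟨fun k t2 _ => by simp [pvF_nil, pvMerge_nil, pvSeek1], ?_⟩
    intro k a sa t1 t2 hak ht1 ht2
    rw [pvF_nil, pvF_nil, List.append_nil, List.append_nil, pvSeek2]
    exact (pvMerge_cons_none n1 n2 a sa t1 t2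
      (by rw [List.dropWhile_eq_nil_iff]; intro p hp; simpa using ht2 p hp)).trans (by simp)
  | cons x r ih =>
    obtain ⟨n, s⟩ := x
    constructor
    · -- seek1 state
      intro k t2 ht2
      rw [pvF_cons, pvF_cons, pvSeek1]
      by_cases h1 : (n == n1) = true
      all_goals by_cases h2 : (n == n2) = true
      · simp only [h1, h2, if_true]
        have := ih.2 (k + 1) k s [] (t2 ++ [(k, s)]) (by omega)
          (by simp)
          (by intro p hp; rcases List.mem_append.1 hp with h | h
              · exact le_of_lt (ht2 p h)
              · simp at h; simp [h])
        simpa using this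
      · simp only [h1, if_true, if_neg h2]
        have := ih.2 (k + 1) k s [] t2 (by omega) (by simp)
          (fun p hp => le_of_lt (ht2 p hp))
        simpa using this
      · simp only [h2, if_true, if_neg h1]
        have := ih.1 (k + 1) (t2 ++ [(k, s)])
          (by intro p hp; rcases List.mem_append.1 hp with h | h
              · have := ht2 p h; omega
              · simp at h; simp [h])
        simpa using this
      · simp only [if_neg h1, if_neg h2]
        exact ih.1 (k + 1) t2 (fun p hp => by have := ht2 p hp; omega)
    · -- seek2 state, current name1 utterance at index a < k
      intro k a sa t1 t2 hak ht1 ht2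
      rw [pvF_cons, pvF_cons, pvSeek2]
      by_cases h2 : (n == n2) = true
      · simp only [h2, if_true]
        have hdrop : (t2 ++ ((k, s) :: pvF n2 (k + 1) r)).dropWhile
            (fun p => decide (p.1 ≤ a)) = (k, s) :: pvF n2 (k + 1) r := by
          rw [pvDrop_all t2 ht2]
          exact pvDrop_none _ (by
            intro p hp
            rcases List.mem_cons.1 hp with h | h
            · subst h; simpa using hak
            · have := pvF_lb n2 (k + 1) r p h; omega)
        rw [pvMerge_cons_emit n1 n2 a k sa s _ _ _ hdrop]
        have hdrop1 : (t1 ++ (if (n == n1) = true then (k, s) :: pvF n1 (k + 1) r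
            else pvF n1 (k + 1) r)).dropWhile (fun p => decide (p.1 ≤ k)) = pvF n1 (k + 1) r := by
          rw [pvDrop_all t1 (fun p hp => le_of_lt (ht1 p hp))]
          have hrest : (pvF n1 (k + 1) r).dropWhile (fun p => decide (p.1 ≤ k))
              = pvF n1 (k + 1) r :=
            pvDrop_none _ (fun p hp => by have := pvF_lb n1 (k + 1) r p hp; omega)
          split
          · simpa [List.dropWhile_cons] using hrest
          · exact hrest
        rw [hdrop1]
        have := ih.1 (k + 1) [] (by simp)
        simp only [List.nil_append] at this
        rw [this, List.map_cons]
      · simp only [if_neg h2]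
        by_cases h1 : (n == n1) = true
        · simp only [h1, if_true]
          have := ih.2 (k + 1) a sa (t1 ++ [(k, s)]) t2 (by omega)
            (by intro p hp; rcases List.mem_append.1 hp with h | h
                · have := ht1 p h; omega
                · simp at h; simp [h])
            ht2
          simpa using this
        · simp only [if_neg h1]
          exact ih.2 (k + 1) a sa t1 t2 (by omega)
            (fun p hp => by have := ht1 p hp; omega) ht2

theorem pvFoldA (n1 n2 : String) (l : List (String × String))
    (acc : List (PySem.Dict String String)) (o1 : Option String) :
    (l.foldl (pvStepA n1 n2) (acc, PySem.Dict.empty, o1, none)).1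
      = acc ++ (match o1 with | none => pvSeek1 n1 n2 l | some sa => pvSeek2 n1 n2 sa l) := by
  induction l generalizing acc o1 with
  | nil => cases o1 <;> simp [pvSeek1, pvSeek2]
  | cons x r ih =>
    obtain ⟨n, s⟩ := x
    rw [List.foldl_cons]
    cases o1 with
    | none =>
      by_cases h1 : (n == n1) = true
      · have hstep : pvStepA n1 n2 (acc, PySem.Dict.empty, none, none) (n, s)
            = (acc, PySem.Dict.empty, some s, none) := by
          simp [pvStepA, h1]
        rw [hstep, ih acc (some s)]
        simp [pvSeek1, h1]
      · have hstep : pvStepA n1 n2 (acc, PySem.Dict.empty, none, none) (n, s)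
            = (acc, PySem.Dict.empty, none, none) := by
          simp [pvStepA, h1]
        rw [hstep, ih acc none]
        simp [pvSeek1, h1]
    | some sa =>
      by_cases h2 : (n == n2) = true
      · have hstep : pvStepA n1 n2 (acc, PySem.Dict.empty, some sa, none) (n, s)
            = (acc ++ [(PySem.Dict.empty.insert n1 sa).insert n2 s],
               PySem.Dict.empty, none, none) := by
          simp [pvStepA, h2]
        rw [hstep, ih _ none]
        simp [pvSeek2, h2]
      · have hstep : pvStepA n1 n2 (acc, PySem.Dict.empty, some sa, none) (n, s)
            = (acc, PySem.Dict.empty, some sa, none) := by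
          simp [pvStepA, h2]
        rw [hstep, ih acc (some sa)]
        simp [pvSeek2, h2]

-- ===== VERDICT (by name: the statement is the Claim_ definition above) =====
theorem create_conversations_spec : Claim_equal_create_conversations := by
  intro l n1 n2 _
  unfold Spec_create_conversations create_conversations create_conversations_alt
  rw [pvFoldA n1 n2 l [] none]
  have h := (pvKey n1 n2 l).1 0 [] (by simp)
  simp only [List.nil_append] at h ⊢
  rw [← h]
  rfl
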